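-- pv_equiv track=rewrite | github.com/RacleRay/Bank_FAQ_ChatBot | tracker.py | multi_match
-- ===== SOURCE A (Python) =====
-- symbol = {'?*y', '?*x', '?*z', '?x', '?y', '?z'}
--
-- def multi_match(pattern, query):
--     """对匹配的第一个部分，进行提取
--
--     return:
--         匹配对应元组 (symbol, words)
--         下一次搜索起点 index
--     """
--     first_pos, rest = pattern[0], pattern[1:]
--     first_pos = first_pos.replace('?*', '?')
--     # 没有rest项，直接匹配query全部
--     if not rest: return (first_pos, query), len(query)
--
--     # 找到匹配符对应的部分
--     for i, token in enumerate(query):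
--         # rest[0]：不是symbol的第一个字符
--         if rest[0] == token and is_match(rest[1:], query[(i + 1):]):
--             return (first_pos, query[:i]), i
--
--     return None, None
--
-- def is_match(rest, query):
--     "判断剩余部分的匹配情况，这是有必要的（当匹配模式中有多个与rest[0]相同）"
--     # 空
--     if not rest and not query:
--         return True
--     # 匹配到匹配符
--     if rest[0] in symbol:
--         if len(rest) == 1:
--             return True
--         else:
--             return is_match(rest[1:], query)
--     # 不匹配
--     if rest[0] != query[0]:
--         return False
--     else:
--         return is_match(rest[1:], query[1:])
-- ===== SOURCE B (Python) =====
-- symbol = {'?*y', '?*x', '?*z', '?x', '?y', '?z'}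
--
-- def multi_match(pattern, query):
--     """Iterative, index-based re-implementation: no recursion in the matcher."""
--     first_pos = pattern[0].replace('?*', '?')
--     rest = pattern[1:]
--     if not rest:
--         return (first_pos, query), len(query)
--     i = 0
--     while i < len(query):
--         if rest[0] == query[i] and is_match(rest[1:], query[i + 1:]):
--             return (first_pos, query[:i]), i
--         i += 1
--     return None, None
--
-- def is_match(rest, query):
--     "Two-index scan over rest and query instead of recursion with slicing."
--     i = j = 0
--     while i < len(rest):
--         if rest[i] in symbol:
--             if i == len(rest) - 1:
--                 return True
--             i += 1
--         else:
--             if j >= len(query) or rest[i] != query[j]: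
--                 return False
--             i += 1
--             j += 1
--     return j == len(query)
-- ===== Notes on version B (the rewrite author's own statement) =====
-- stated objective: alternative
-- what changed: is_match is rewritten as an iterative two-index scan (total: it returns False where A's recursion hits an IndexError) and multi_match's candidate scan becomes an explicit index loop, replacing A's recursion-with-slicing.
import Mathlib
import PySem

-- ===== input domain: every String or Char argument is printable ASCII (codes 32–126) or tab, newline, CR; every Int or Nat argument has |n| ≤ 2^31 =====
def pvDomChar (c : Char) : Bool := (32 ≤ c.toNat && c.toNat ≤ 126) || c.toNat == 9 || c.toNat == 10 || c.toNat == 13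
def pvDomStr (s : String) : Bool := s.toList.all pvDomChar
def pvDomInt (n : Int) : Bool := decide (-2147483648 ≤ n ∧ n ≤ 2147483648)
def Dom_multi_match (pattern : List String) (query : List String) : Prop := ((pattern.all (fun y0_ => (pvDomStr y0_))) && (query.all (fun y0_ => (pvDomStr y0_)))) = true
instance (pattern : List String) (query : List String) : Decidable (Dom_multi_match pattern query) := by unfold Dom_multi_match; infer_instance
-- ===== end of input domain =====

-- B replaces is_match's recursion-with-slicing by an iterative two-index scan
-- (total where A raises IndexError) and uses an explicit index loop in
-- multi_match; objective: alternative decomposition of the same matcher.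

-- the module-level set `symbol` (shared constant, used by both ports)
def symbolSet : List String := ["?*y", "?*x", "?*z", "?x", "?y", "?z"]

-- ===== PORT A =====
-- A's recursive is_match; `none` marks the inputs where the Python raises IndexError
-- (rest empty with query non-empty, or query empty at a literal); those calls are
-- excluded by Pre_multi_match.
def isMatchA : List String → List String → Option Bool
  | [], [] => some true
  | [], _ :: _ => none                       -- Python: rest[0] raises IndexError
  | r :: rs, q =>
    if r ∈ symbolSet then
      if rs = [] then some true else isMatchA rs q
    else
      match q with
      | [] => none                           -- Python: query[0] raises IndexError
      | qh :: qt => if r ≠ qh then some false else isMatchA rs qt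

-- A's `for i, token in enumerate(query)` loop
def loopA (fp r0 : String) (rt query : List String) (i : Nat) :
    List String → (Option (String × List String)) × Option Int
  | [] => (none, none)
  | t :: ts =>
    if r0 = t then
      match isMatchA rt (query.drop (i + 1)) with
      | none => (none, none)                 -- Python raises here (outside Pre_)
      | some true => (some (fp, query.take i), some (Int.ofNat i))
      | some false => loopA fp r0 rt query (i + 1) ts
    else loopA fp r0 rt query (i + 1) ts

def multi_match (pattern : List String) (query : List String) :
    (Option (String × List String)) × Option Int :=
  match pattern with
  | [] => (none, none)                       -- Python: pattern[0] raises (outside Pre_)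
  | p :: rest =>
    let fp := PySem.Str.replace p "?*" "?"
    match rest with
    | [] => (some (fp, query), some (Int.ofNat query.length))
    | r0 :: rt => loopA fp r0 rt query 0 query

-- ===== PORT B =====
-- Source B's is_match: while i < len(rest) with two indices i, j
def isMatchBLoop (rest query : List String) (i j : Nat) : Bool :=
  if h : i < rest.length then
    if rest[i] ∈ symbolSet then
      if i == rest.length - 1 then true
      else isMatchBLoop rest query (i + 1) j
    else
      if hj : j < query.length then
        if rest[i] ≠ query[j] then false
        else isMatchBLoop rest query (i + 1) (j + 1)
      else false
  else j == query.length
termination_by rest.length - i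

def isMatchB (rest query : List String) : Bool := isMatchBLoop rest query 0 0

-- Source B's `while i < len(query)` candidate loop
def loopB (fp r0 : String) (rt query : List String) (i : Nat) :
    (Option (String × List String)) × Option Int :=
  if h : i < query.length then
    if r0 = query[i] ∧ isMatchB rt (query.drop (i + 1)) = true then
      (some (fp, query.take i), some (Int.ofNat i))
    else loopB fp r0 rt query (i + 1)
  else (none, none)
termination_by query.length - i

def multi_match_alt (pattern : List String) (query : List String) :
    (Option (String × List String)) × Option Int :=
  match pattern with
  | [] => (none, none)                       -- Source B: pattern[0] raises (outside Pre_)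
  | p :: rest =>
    let fp := PySem.Str.replace p "?*" "?"
    match rest with
    | [] => (some (fp, query), some (Int.ofNat query.length))
    | r0 :: rt => loopB fp r0 rt query 0

-- ===== PRECONDITION & SPEC =====
-- closed-form characterisation of A's is_match (no recursion re-simulated):
-- literals of rest, whether rest ends with a symbol, and prefix relations
def litsOf (rest : List String) : List String := rest.filter (fun s => s ∉ symbolSet)

def endsSym (rest : List String) : Bool :=
  match rest.getLast? with
  | some s => s ∈ symbolSet
  | none => false

-- A's is_match returns True exactly here
def matchTrueB (rest query : List String) : Bool :=
  if endsSym rest then (litsOf rest).isPrefixOf query else litsOf rest = query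

-- A's is_match raises IndexError exactly here
def matchRaiseB (rest query : List String) : Bool :=
  if endsSym rest then query.isPrefixOf (litsOf rest) && query ≠ litsOf rest
  else (query.isPrefixOf (litsOf rest) && query ≠ litsOf rest) ||
       ((litsOf rest).isPrefixOf query && litsOf rest ≠ query)

-- Pre_ excludes exactly the inputs where the Python A raises IndexError: empty
-- pattern, and any query whose first raising candidate position is not preceded
-- by a succeeding candidate.
def Pre_multi_match (pattern : List String) (query : List String) : Prop :=
  pattern ≠ [] ∧
  ∀ i < query.length,
    (query.getD i "" = (pattern.tail).headD "" ∧ pattern.tail ≠ [] ∧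
      matchRaiseB pattern.tail.tail (query.drop (i + 1)) = true) →
    ∃ j < i, query.getD j "" = (pattern.tail).headD "" ∧
      matchTrueB pattern.tail.tail (query.drop (j + 1)) = true

instance (pattern : List String) (query : List String) : Decidable (Pre_multi_match pattern query) := by
  unfold Pre_multi_match; infer_instance

def pvWitness_multi_match : List String × List String := (["?x", "a"], ["b", "a"])

def Spec_multi_match (pattern : List String) (query : List String) (out : (Option (String × List String)) × Option Int) : Prop := out = multi_match_alt pattern query
instance (pattern : List String) (query : List String) (out : (Option (String × List String)) × Option Int) : Decidable (Spec_multi_match pattern query out) := by unfold Spec_multi_match; infer_instance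

-- ===== CLAIM (what is proved, stated in full; the proofs are below) =====
def Claim_equal_multi_match : Prop := ∀ (pattern : List String) (query : List String), Dom_multi_match pattern query → Pre_multi_match pattern query → Spec_multi_match pattern query (multi_match pattern query)


-- ===== LEMMAS AND PROOFS =====


def bref : List String → List String → Bool
  | [], q => q.isEmpty
  | r :: rs, q =>
    if r ∈ symbolSet then
      if rs = [] then true else bref rs q
    else
      match q with
      | [] => false
      | qh :: qt => if r ≠ qh then false else bref rs qt

theorem bref_cons_sym {r : String} {rs q : List String} (hs : r ∈ symbolSet) :
    bref (r :: rs) q = if rs = [] then true else bref rs q := by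
  simp [bref, hs]

theorem bref_cons_lit_nil {r : String} {rs : List String} (hs : r ∉ symbolSet) :
    bref (r :: rs) [] = false := by
  simp [bref, hs]

theorem bref_cons_lit_cons {r qh : String} {rs qt : List String} (hs : r ∉ symbolSet) :
    bref (r :: rs) (qh :: qt) = if r = qh then bref rs qt else false := by
  by_cases he : r = qh
  · subst he; simp [bref, hs]
  · simp [bref, hs, he]

theorem isMatchBLoop_eq_bref (rest query : List String) (i j : Nat)
    (hj : j ≤ query.length) :
    isMatchBLoop rest query i j = bref (rest.drop i) (query.drop j) := by
  by_cases h : i < rest.length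
  · have hdrop : rest.drop i = rest[i] :: rest.drop (i + 1) :=
      (List.drop_eq_getElem_cons h).symm ▸ rfl
    rw [isMatchBLoop, dif_pos h, hdrop]
    by_cases hs : rest[i] ∈ symbolSet
    · rw [if_pos hs, bref_cons_sym hs]
      by_cases hlast : i = rest.length - 1
      · have hnil : rest.drop (i + 1) = [] := List.drop_eq_nil_of_le (by omega)
        have hb : (i == rest.length - 1) = true := by simp [hlast]
        simp [hb, hnil]
      · have hne : rest.drop (i + 1) ≠ [] := by
          simp only [ne_eq, List.drop_eq_nil_iff]; omega
        have hb : (i == rest.length - 1) = false := by simp [hlast]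
        rw [isMatchBLoop_eq_bref rest query (i + 1) j hj]
        simp [hb, hne]
    · rw [if_neg hs]
      by_cases hq : j < query.length
      · have hqdrop : query.drop j = query[j] :: query.drop (j + 1) :=
          (List.drop_eq_getElem_cons hq).symm ▸ rfl
        rw [dif_pos hq, hqdrop, bref_cons_lit_cons hs]
        by_cases hne : rest[i] = query[j]
        · rw [isMatchBLoop_eq_bref rest query (i + 1) (j + 1) (by omega)]
          simp [hne]
        · simp [hne]
      · have hnil : query.drop j = [] := List.drop_eq_nil_of_le (by omega)
        rw [dif_neg hq, hnil, bref_cons_lit_nil hs]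
  · have hnil : rest.drop i = [] := List.drop_eq_nil_of_le (by omega)
    rw [isMatchBLoop, dif_neg h, hnil]
    by_cases hj' : j = query.length
    · subst hj'; simp [bref, List.drop_length]
    · have hne : query.drop j ≠ [] := by simp only [ne_eq, List.drop_eq_nil_iff]; omega
      cases hq : query.drop j with
      | nil => exact absurd hq hne
      | cons a as => simp [bref, hj']
termination_by rest.length - i

theorem litsOf_cons (r : String) (rs : List String) :
    litsOf (r :: rs) = if r ∈ symbolSet then litsOf rs else r :: litsOf rs := by
  by_cases hs : r ∈ symbolSet <;> simp [litsOf, hs]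

theorem endsSym_cons (r : String) (rs : List String) :
    endsSym (r :: rs) = if rs = [] then decide (r ∈ symbolSet) else endsSym rs := by
  cases rs <;> simp [endsSym]

theorem isMatchA_char (rest query : List String) :
    isMatchA rest query =
      if matchRaiseB rest query then none else some (matchTrueB rest query) := by
  induction rest generalizing query with
  | nil =>
    cases query <;> simp [isMatchA, matchRaiseB, matchTrueB, endsSym, litsOf, List.isPrefixOf]
  | cons r rs ih =>
    by_cases hs : r ∈ symbolSet
    · by_cases hrs : rs = []
      · subst hrs
        simp [isMatchA, hs, matchRaiseB, matchTrueB, endsSym_cons, litsOf]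
      · have h1 : matchRaiseB (r :: rs) query = matchRaiseB rs query := by
          simp [matchRaiseB, endsSym_cons, hrs, litsOf_cons, hs]
        have h2 : matchTrueB (r :: rs) query = matchTrueB rs query := by
          simp [matchTrueB, endsSym_cons, hrs, litsOf_cons, hs]
        simp [isMatchA, hs, hrs, h1, h2, ih]
    · have hL : litsOf (r :: rs) = r :: litsOf rs := by rw [litsOf_cons, if_neg hs]
      have hE : endsSym (r :: rs) = endsSym rs := by
        cases rs with
        | nil => simp [endsSym, hs]
        | cons x xs => rw [endsSym_cons]; simp
      cases query with
      | nil =>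
        have h1 : matchRaiseB (r :: rs) [] = true := by
          simp [matchRaiseB, hE, hL, List.isPrefixOf]
        simp [isMatchA, hs, h1]
      | cons qh qt =>
        by_cases he : r = qh
        · subst he
          have h1 : matchRaiseB (r :: rs) (r :: qt) = matchRaiseB rs qt := by
            simp [matchRaiseB, hE, hL]
          have h2 : matchTrueB (r :: rs) (r :: qt) = matchTrueB rs qt := by
            simp [matchTrueB, hE, hL]
          simp [isMatchA, hs, h1, h2, ih]
        · have h1 : matchRaiseB (r :: rs) (qh :: qt) = false := by
            simp [matchRaiseB, hE, hL, List.isPrefixOf, he, Ne.symm he]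
          have h2 : matchTrueB (r :: rs) (qh :: qt) = false := by
            simp [matchTrueB, hE, hL, List.isPrefixOf, he]
          simp [isMatchA, hs, he, h1, h2]

theorem bref_of_isMatchA (rest query : List String) (b : Bool)
    (h : isMatchA rest query = some b) : bref rest query = b := by
  induction rest generalizing query b with
  | nil =>
    cases query <;> simp_all [isMatchA, bref]
  | cons r rs ih =>
    rw [isMatchA.eq_def] at h
    by_cases hs : r ∈ symbolSet
    · by_cases hrs : rs = []
      · subst hrs
        simp [hs] at h
        simp [bref, hs, ← h]
      · simp only [hs, if_true, hrs, if_false] at h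
        rw [bref_cons_sym hs, if_neg hrs]
        exact ih query b h
    · cases query with
      | nil => simp [hs] at h
      | cons qh qt =>
        by_cases he : r = qh
        · subst he
          simp [hs] at h
          rw [bref_cons_lit_cons hs, if_pos rfl]
          exact ih qt b h
        · simp [hs, he] at h
          rw [bref_cons_lit_cons hs, if_neg he, ← h]

theorem loop_eq (fp r0 : String) (rt query : List String) (i : Nat)
    (hpre : ∀ k, i ≤ k → k < query.length →
      (query.getD k "" = r0 ∧ matchRaiseB rt (query.drop (k + 1)) = true) →
      ∃ j < k, query.getD j "" = r0 ∧ matchTrueB rt (query.drop (j + 1)) = true)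
    (hinv : ∀ j < i, query.getD j "" = r0 →
      isMatchA rt (query.drop (j + 1)) = some false) :
    loopA fp r0 rt query i (query.drop i) = loopB fp r0 rt query i := by
  by_cases h : i < query.length
  · have hdrop : query.drop i = query[i] :: query.drop (i + 1) :=
      (List.drop_eq_getElem_cons h).symm ▸ rfl
    rw [hdrop, loopA, loopB, dif_pos h]
    by_cases he : r0 = query[i]
    · have hB : isMatchB rt (query.drop (i + 1)) = bref rt (query.drop (i + 1)) :=
        isMatchBLoop_eq_bref rt (query.drop (i + 1)) 0 0 (by omega)
      by_cases hr : matchRaiseB rt (query.drop (i + 1)) = true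
      · -- A raises here: ruled out by hpre + hinv
        exfalso
        obtain ⟨j, hji, hj0, hjt⟩ := hpre i le_rfl h
          ⟨by rw [List.getD_eq_getElem?_getD, List.getElem?_eq_getElem h]; simp [he], hr⟩
        have hfalse := hinv j (by omega) hj0
        rw [isMatchA_char] at hfalse
        by_cases hjr : matchRaiseB rt (query.drop (j + 1)) = true
        · simp [hjr] at hfalse
        · simp [hjr, hjt] at hfalse
      · have hA : isMatchA rt (query.drop (i + 1)) =
            some (matchTrueB rt (query.drop (i + 1))) := by
          rw [isMatchA_char, if_neg hr]
        have hbr : bref rt (query.drop (i + 1)) = matchTrueB rt (query.drop (i + 1)) :=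
          bref_of_isMatchA _ _ _ hA
        by_cases ht : matchTrueB rt (query.drop (i + 1)) = true
        · rw [hA, ht]
          simp [he, hB, hbr, ht]
        · have hrec := loop_eq fp r0 rt query (i + 1)
            (fun k hk => hpre k (by omega))
            (by
              intro j hj hj0
              by_cases hji : j < i
              · exact hinv j hji hj0
              · have hji' : j = i := by omega
                subst hji'
                rw [hA]
                simp [Bool.eq_false_iff.mpr, ht])
          rw [hA]
          simp only [ht]
          have hcond : ¬ (r0 = query[i] ∧ isMatchB rt (query.drop (i + 1)) = true) := by
            rw [hB, hbr]; tauto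
          rw [if_neg hcond]
          simpa using hrec
    · have hrec := loop_eq fp r0 rt query (i + 1)
        (fun k hk => hpre k (by omega))
        (by
          intro j hj hj0
          by_cases hji : j < i
          · exact hinv j hji hj0
          · exfalso
            have hji' : j = i := by omega
            subst hji'
            rw [List.getD_eq_getElem?_getD, List.getElem?_eq_getElem h] at hj0
            exact he hj0.symm)
      have hcond : ¬ (r0 = query[i] ∧ isMatchB rt (query.drop (i + 1)) = true) := by
        tauto
      rw [if_neg he, if_neg hcond]
      simpa using hrec
  · have hnil : query.drop i = [] := List.drop_eq_nil_of_le (by omega)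
    rw [hnil, loopA, loopB, dif_neg h]
termination_by query.length - i

-- ===== VERDICT (by name: the statement is the Claim_ definition above) =====
theorem multi_match_spec : Claim_equal_multi_match := by
  intro pattern query _ hpre
  unfold Spec_multi_match
  obtain ⟨hne, hloop⟩ := hpre
  match pattern with
  | [] => exact absurd rfl hne
  | [p] => rfl
  | p :: r0 :: rt =>
    show loopA _ r0 rt query 0 query = loopB _ r0 rt query 0
    have h0 := loop_eq (PySem.Str.replace p "?*" "?") r0 rt query 0
      (fun k _ hk hc => hloop k hk (by simpa using hc))
      (fun j hj _ => absurd hj (by omega))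
    simpa using h0
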